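-- pv_equiv track=rewrite | github.com/Mento79/Connect-4 | Controller.py | check
-- ===== SOURCE A (Python) =====
-- def check(arr):
--     if len(arr) != 3:
--         return False
--
--     dp = [0]*9
--     for i in range(3):
--         if len(arr[i]) != 3:
--             return False
--         for j in range(3):
--             if arr[i][j]<0 or arr[i][j]>8:
--                 return False
--             if dp[arr[i][j]] != 0:
--                 return False
--             dp[arr[i][j]] = 1
--
--     return True
-- ===== SOURCE B (Python) =====
-- def check(arr):
--     if len(arr) != 3:
--         return False
--     if any(len(row) != 3 for row in arr):
--         return False
--     flat = [v for row in arr for v in row]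
--     return sorted(flat) == list(range(9))
-- ===== Notes on version B (the rewrite author's own statement) =====
-- stated objective: simpler
-- what changed: Replaced A's seen-marker dp table with inline bounds and duplicate checks by flattening the 3x3 grid and comparing its sorted form against list(range(9)).
import Mathlib
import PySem

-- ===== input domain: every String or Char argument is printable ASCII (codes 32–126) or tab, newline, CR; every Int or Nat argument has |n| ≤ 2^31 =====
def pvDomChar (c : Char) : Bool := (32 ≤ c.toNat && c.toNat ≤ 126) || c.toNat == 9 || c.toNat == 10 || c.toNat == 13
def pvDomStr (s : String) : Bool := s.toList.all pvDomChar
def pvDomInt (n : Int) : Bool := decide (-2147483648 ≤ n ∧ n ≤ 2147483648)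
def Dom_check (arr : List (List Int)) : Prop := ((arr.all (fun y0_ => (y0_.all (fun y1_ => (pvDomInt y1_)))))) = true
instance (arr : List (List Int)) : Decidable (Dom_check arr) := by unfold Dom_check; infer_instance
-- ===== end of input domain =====

-- B replaces A's seen-marker dp table and inline bounds/duplicate checks by flattening the
-- grid and comparing its sorted form with [0..8] (objective: simpler).

-- ===== PORT A =====
-- one cell of A's inner loop body: range check, dp duplicate check, dp[v] = 1
def checkCell (dp : List Int) (v : Int) : Option (List Int) :=
  if v < 0 ∨ v > 8 then none
  else if PySem.List.pyGetD dp v 0 ≠ 0 then none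
  else some (dp.set v.toNat 1)

def check (arr : List (List Int)) : Bool :=
  if arr.length ≠ 3 then false
  else
    (arr.foldl
      (fun acc row => acc.bind (fun dp =>
        if row.length ≠ 3 then none
        else row.foldl (fun acc2 v => acc2.bind (fun dp2 => checkCell dp2 v)) (some dp)))
      (some (List.replicate 9 (0 : Int)))).isSome

-- ===== PORT B =====
def check_alt (arr : List (List Int)) : Bool :=
  if arr.length ≠ 3 then false
  else if arr.any (fun row => row.length ≠ 3) then false
  else decide (PySem.List.sorted arr.flatten (fun x => x) false = PySem.List.pyRange 0 9 1)

-- ===== PRECONDITION & SPEC =====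
def Spec_check (arr : List (List Int)) (out : Bool) : Prop := out = check_alt arr
instance (arr : List (List Int)) (out : Bool) : Decidable (Spec_check arr out) := by unfold Spec_check; infer_instance

-- ===== CLAIM (what is proved, stated in full; the proofs are below) =====
def Claim_equal_check : Prop := ∀ (arr : List (List Int)), Dom_check arr → Spec_check arr (check arr)

-- ===== LEMMAS AND PROOFS =====

-- dp list that marks exactly the values already seen (A's loop state)
def dpMark (s : List Int) (k : Int) : Int := if k ∈ s then 1 else 0

def dpOf (s : List Int) : List Int :=
  [dpMark s 0, dpMark s 1, dpMark s 2, dpMark s 3, dpMark s 4,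
   dpMark s 5, dpMark s 6, dpMark s 7, dpMark s 8]

theorem dpOf_length (s : List Int) : (dpOf s).length = 9 := by
  simp [dpOf]

theorem getElem_dpOf (s : List Int) (k : Nat) (hk : k < (dpOf s).length) :
    (dpOf s)[k] = if (k : Int) ∈ s then 1 else 0 := by
  have hk9 : k < 9 := by simpa [dpOf_length] using hk
  interval_cases k <;> simp [dpOf, dpMark]

theorem pyGetD_dpOf (s : List Int) (v : Int) (h0 : 0 ≤ v) (h8 : v ≤ 8) :
    PySem.List.pyGetD (dpOf s) v 0 = (if v ∈ s then 1 else 0) := by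
  have hv : v = ((v.toNat : Nat) : Int) := by omega
  rw [hv, PySem.List.pyGetD_natCast]
  have hlt : v.toNat < (dpOf s).length := by rw [dpOf_length]; omega
  rw [List.getD_eq_getElem _ _ hlt, getElem_dpOf s _ hlt]

theorem dpOf_set (s : List Int) (v : Int) (h0 : 0 ≤ v) (h8 : v ≤ 8) :
    (dpOf s).set v.toNat 1 = dpOf (s ++ [v]) := by
  apply List.ext_getElem
  · simp [dpOf]
  · intro k hk hk'
    have hk9 : k < 9 := by simpa [dpOf_length] using hk'
    rw [List.getElem_set, getElem_dpOf, getElem_dpOf]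
    by_cases hkv : v.toNat = k
    · have : (k : Int) = v := by omega
      simp [hkv, this]
    · have : (k : Int) ≠ v := by omega
      simp [hkv, this]

theorem checkCell_dpOf (s : List Int) (v : Int) :
    checkCell (dpOf s) v =
      (if 0 ≤ v ∧ v ≤ 8 ∧ v ∉ s then some (dpOf (s ++ [v])) else none) := by
  unfold checkCell
  by_cases hr : v < 0 ∨ v > 8
  · rw [if_pos hr, if_neg (by omega)]
  · have h0 : 0 ≤ v := by omega
    have h8 : v ≤ 8 := by omega
    rw [if_neg hr, pyGetD_dpOf s v h0 h8]
    by_cases hm : v ∈ s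
    · simp [hm, h0, h8]
    · simp [hm, h0, h8, dpOf_set s v h0 h8]

-- a bind-shaped foldl started from none stays none
theorem foldl_bind_none {α : Type} (g : α → List Int → Option (List Int)) (l : List α) :
    l.foldl (fun acc x => acc.bind (fun dp => g x dp)) none = none := by
  induction l with
  | nil => rfl
  | cons x t ih => simpa using ih

-- A's inner loop over one row, from the marker state of an already-seen list s
theorem row_run (l s : List Int) (hs : s.Nodup) :
    l.foldl (fun acc2 v => acc2.bind (fun dp2 => checkCell dp2 v)) (some (dpOf s)) =
      (if (∀ v ∈ l, 0 ≤ v ∧ v ≤ 8 ∧ v ∉ s) ∧ l.Nodup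
       then some (dpOf (s ++ l)) else none) := by
  induction l generalizing s with
  | nil => simp
  | cons v t ih =>
    rw [List.foldl_cons, Option.bind_some, checkCell_dpOf]
    by_cases hv : 0 ≤ v ∧ v ≤ 8 ∧ v ∉ s
    · have hs' : (s ++ [v]).Nodup := by
        rw [List.nodup_append]
        exact ⟨hs, List.nodup_singleton v, fun a ha b hb hab => hv.2.2 ((hab.trans (List.mem_singleton.mp hb)) ▸ ha)⟩
      rw [if_pos hv, ih (s ++ [v]) hs']
      have harg : s ++ [v] ++ t = s ++ (v :: t) := by simp
      have hC : ((∀ w ∈ t, 0 ≤ w ∧ w ≤ 8 ∧ w ∉ s ++ [v]) ∧ t.Nodup) ↔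
          ((∀ w ∈ v :: t, 0 ≤ w ∧ w ≤ 8 ∧ w ∉ s) ∧ (v :: t).Nodup) := by
        constructor
        · rintro ⟨h1, h2⟩
          refine ⟨?_, ?_⟩
          · intro w hw
            rcases List.mem_cons.mp hw with rfl | hw
            · exact hv
            · have := h1 w hw
              exact ⟨this.1, this.2.1, fun hws => this.2.2 (by simp [hws])⟩
          · rw [List.nodup_cons]
            exact ⟨fun hvt => (h1 v hvt).2.2 (by simp), h2⟩
        · rintro ⟨h1, h2⟩
          refine ⟨?_, (List.nodup_cons.mp h2).2⟩
          intro w hw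
          have := h1 w (by simp [hw])
          refine ⟨this.1, this.2.1, ?_⟩
          intro hws
          rcases List.mem_append.mp hws with h | h
          · exact this.2.2 h
          · have : w = v := by simpa using h
            subst this
            exact (List.nodup_cons.mp h2).1 hw
      exact if_congr hC (by rw [harg]) rfl
    · rw [if_neg hv, foldl_bind_none, if_neg]
      rintro ⟨h1, -⟩
      exact hv (h1 v (by simp))

-- A's outer loop over the rows
theorem rows_run (rows : List (List Int)) (s : List Int) (hs : s.Nodup) :
    rows.foldl
      (fun acc row => acc.bind (fun dp =>
        if row.length ≠ 3 then none
        else row.foldl (fun acc2 v => acc2.bind (fun dp2 => checkCell dp2 v)) (some dp)))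
      (some (dpOf s)) =
      (if (∀ row ∈ rows, row.length = 3) ∧
          (∀ v ∈ rows.flatten, 0 ≤ v ∧ v ≤ 8 ∧ v ∉ s) ∧ rows.flatten.Nodup
       then some (dpOf (s ++ rows.flatten)) else none) := by
  induction rows generalizing s with
  | nil => simp
  | cons r t ih =>
    rw [List.foldl_cons, Option.bind_some]
    by_cases hr : r.length = 3
    · rw [if_neg (show ¬(r.length ≠ 3) from fun h => h hr), row_run r s hs]
      by_cases hrow : (∀ v ∈ r, 0 ≤ v ∧ v ≤ 8 ∧ v ∉ s) ∧ r.Nodup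
      · have hs' : (s ++ r).Nodup := by
          rw [List.nodup_append]
          exact ⟨hs, hrow.2, fun a ha b hb hab => (hrow.1 b hb).2.2 (hab ▸ ha)⟩
        rw [if_pos hrow, ih (s ++ r) hs']
        have harg : s ++ r ++ t.flatten = s ++ (r :: t).flatten := by simp
        have hC : ((∀ row ∈ t, row.length = 3) ∧
              (∀ v ∈ t.flatten, 0 ≤ v ∧ v ≤ 8 ∧ v ∉ s ++ r) ∧ t.flatten.Nodup) ↔
            ((∀ row ∈ r :: t, row.length = 3) ∧
              (∀ v ∈ (r :: t).flatten, 0 ≤ v ∧ v ≤ 8 ∧ v ∉ s) ∧ (r :: t).flatten.Nodup) := by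
          constructor
          · rintro ⟨h1, h2, h3⟩
            refine ⟨?_, ?_, ?_⟩
            · intro row hrw
              rcases List.mem_cons.mp hrw with rfl | hrw
              · exact hr
              · exact h1 row hrw
            · intro v hv
              rw [List.flatten_cons] at hv
              rcases List.mem_append.mp hv with hv | hv
              · exact hrow.1 v hv
              · have := h2 v hv
                exact ⟨this.1, this.2.1, fun hvs => this.2.2 (by simp [hvs])⟩
            · have : (r :: t).flatten = r ++ t.flatten := by simp
              rw [this, List.nodup_append]
              exact ⟨hrow.2, h3, fun a ha b hb hab => (h2 b hb).2.2 (by simp [hab ▸ ha])⟩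
          · rintro ⟨h1, h2, h3⟩
            have hnd : (r ++ t.flatten).Nodup := by simpa using h3
            refine ⟨fun row hrw => h1 row (by simp [hrw]), ?_, (List.nodup_append.mp hnd).2.1⟩
            intro v hv
            have := h2 v (by rw [List.flatten_cons]; exact List.mem_append.mpr (Or.inr hv))
            refine ⟨this.1, this.2.1, ?_⟩
            intro hvs
            rcases List.mem_append.mp hvs with h | h
            · exact this.2.2 h
            · exact (List.nodup_append.mp hnd).2.2 v h v hv rfl
        exact if_congr hC (by rw [harg]) rfl
      · rw [if_neg hrow, foldl_bind_none, if_neg]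
        rintro ⟨h1, h2, h3⟩
        apply hrow
        have hnd : (r ++ t.flatten).Nodup := by simpa using h3
        exact ⟨fun v hv => h2 v (by rw [List.flatten_cons]; exact List.mem_append.mpr (Or.inl hv)),
          (List.nodup_append.mp hnd).1⟩
    · rw [if_pos (show r.length ≠ 3 from hr), foldl_bind_none, if_neg]
      rintro ⟨h1, -⟩
      exact hr (h1 r (by simp))

theorem perm_range9 (l : List Int) (hlen : l.length = 9)
    (hmem : ∀ v ∈ l, 0 ≤ v ∧ v ≤ 8) (hnd : l.Nodup) :
    l.Perm [0, 1, 2, 3, 4, 5, 6, 7, 8] := by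
  have hsub : l ⊆ [0, 1, 2, 3, 4, 5, 6, 7, 8] := by
    intro v hv
    obtain ⟨h1, h2⟩ := hmem v hv
    have h9 : v = 0 ∨ v = 1 ∨ v = 2 ∨ v = 3 ∨ v = 4 ∨ v = 5 ∨ v = 6 ∨ v = 7 ∨ v = 8 := by
      omega
    simpa using h9
  exact (hnd.subperm hsub).perm_of_length_le (by simp [hlen])

theorem sorted_eq_range9_iff (l : List Int) (hlen : l.length = 9) :
    PySem.List.sorted l (fun x => x) false = PySem.List.pyRange 0 9 1 ↔
      (∀ v ∈ l, 0 ≤ v ∧ v ≤ 8) ∧ l.Nodup := by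
  have hrange : PySem.List.pyRange 0 9 1 = [0, 1, 2, 3, 4, 5, 6, 7, 8] := by decide
  rw [hrange]
  constructor
  · intro h
    have hperm : List.Perm [0, 1, 2, 3, 4, 5, 6, 7, 8] l := by
      rw [← h]; exact PySem.List.sorted_perm l (fun x => x) false
    refine ⟨fun v hv => ?_, hperm.nodup (by decide)⟩
    have hv8 : v ∈ ([0, 1, 2, 3, 4, 5, 6, 7, 8] : List Int) := hperm.mem_iff.mpr hv
    simp at hv8
    omega
  · rintro ⟨hmem, hnd⟩
    exact PySem.List.sorted_id_eq_of_perm_of_pairwise l _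
      (perm_range9 l hlen hmem hnd).symm (by decide)

-- ===== VERDICT (by name: the statement is the Claim_ definition above) =====
theorem check_spec : Claim_equal_check := by
  intro arr _
  unfold Spec_check check check_alt
  by_cases h3 : arr.length = 3
  · rw [if_neg (show ¬(arr.length ≠ 3) from fun h => h h3),
      if_neg (show ¬(arr.length ≠ 3) from fun h => h h3)]
    have hdp : List.replicate 9 (0 : Int) = dpOf [] := by decide
    rw [hdp, rows_run arr [] List.nodup_nil]
    by_cases hrows : ∀ row ∈ arr, row.length = 3
    · have hany : (arr.any fun row => decide (row.length ≠ 3)) = false := by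
        simp only [List.any_eq_false]
        intro row hrw
        simp [hrows row hrw]
      rw [hany, if_neg (show ¬((false : Bool) = true) by simp)]
      have hlen : arr.flatten.length = 9 := by
        rcases List.length_eq_three.mp h3 with ⟨a, b, c, rfl⟩
        simp [hrows a (by simp), hrows b (by simp), hrows c (by simp)]
      have hiff := sorted_eq_range9_iff arr.flatten hlen
      by_cases hc : (∀ v ∈ arr.flatten, 0 ≤ v ∧ v ≤ 8) ∧ arr.flatten.Nodup
      · have hCtot : (∀ row ∈ arr, row.length = 3) ∧
            (∀ v ∈ arr.flatten, 0 ≤ v ∧ v ≤ 8 ∧ v ∉ ([] : List Int)) ∧ arr.flatten.Nodup :=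
          ⟨hrows, fun v hv => ⟨(hc.1 v hv).1, (hc.1 v hv).2, by simp⟩, hc.2⟩
        rw [if_pos hCtot, decide_eq_true (hiff.mpr hc)]
        rfl
      · have hnC : ¬((∀ row ∈ arr, row.length = 3) ∧
            (∀ v ∈ arr.flatten, 0 ≤ v ∧ v ≤ 8 ∧ v ∉ ([] : List Int)) ∧ arr.flatten.Nodup) :=
          fun h => hc ⟨fun v hv => ⟨(h.2.1 v hv).1, (h.2.1 v hv).2.1⟩, h.2.2⟩
        rw [if_neg hnC, decide_eq_false (fun h => hc (hiff.mp h))]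
        rfl
    · push_neg at hrows
      obtain ⟨row, hrw, hlen⟩ := hrows
      have hany : (arr.any fun row => decide (row.length ≠ 3)) = true := by
        simp only [List.any_eq_true]
        exact ⟨row, hrw, by simpa using hlen⟩
      have hnC : ¬((∀ row ∈ arr, row.length = 3) ∧
          (∀ v ∈ arr.flatten, 0 ≤ v ∧ v ≤ 8 ∧ v ∉ ([] : List Int)) ∧ arr.flatten.Nodup) :=
        fun h => hlen (h.1 row hrw)
      rw [hany, if_pos rfl, if_neg hnC]
      rfl
  · rw [if_pos (show arr.length ≠ 3 from h3), if_pos (show arr.length ≠ 3 from h3)]
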